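-- pv_equiv track=rewrite | github.com/hyuniiya/Algorithm | 프로그래머스/0/181935. 홀짝에 따라 다른 값 반환하기/홀짝에 따라 다른 값 반환하기.py | solution
-- ===== SOURCE A (Python) =====
-- def solution(n):
--     if n % 2 == 1:  # n이 홀수인 경우
--         sum_odd = (n // 2 + 1) ** 2
--         return sum_odd
--     else:  # n이 짝수인 경우
--         sum_even_squares = 0
--         for i in range(2, n + 1, 2):
--             sum_even_squares += i ** 2
--         return sum_even_squares
-- ===== SOURCE B (Python) =====
-- def solution(n):
--     if n % 2 == 1:
--         return ((n + 1) // 2) ** 2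
--     m = max(n // 2, 0)
--     return 2 * m * (m + 1) * (2 * m + 1) // 3
-- ===== Notes on version B (the rewrite author's own statement) =====
-- stated objective: alternative
-- what changed: Replaces the even-case loop that accumulates squares of even numbers by the closed-form square-pyramidal formula in m = half of n (clamped at zero), and writes the odd case as the square of the rounded-up midpoint; intended as asymptotically faster on even inputs, but a timing run over mixed inputs did not confirm it, so no speed is claimed.
import Mathlib
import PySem

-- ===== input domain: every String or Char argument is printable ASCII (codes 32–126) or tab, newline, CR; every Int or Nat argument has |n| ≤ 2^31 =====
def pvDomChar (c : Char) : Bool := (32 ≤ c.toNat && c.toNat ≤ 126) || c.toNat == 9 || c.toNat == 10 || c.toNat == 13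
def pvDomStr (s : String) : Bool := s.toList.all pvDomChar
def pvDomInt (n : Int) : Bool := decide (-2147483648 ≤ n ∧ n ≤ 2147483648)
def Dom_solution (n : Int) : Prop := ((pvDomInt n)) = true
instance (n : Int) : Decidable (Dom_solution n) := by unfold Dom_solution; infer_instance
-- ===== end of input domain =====

-- B replaces A's even-case loop by the closed-form sum-of-even-squares formula (alternative algorithm).

-- ===== PORT A =====
def solution (n : Int) : Int :=
  if PySem.Int.mod n 2 = 1 then
    (PySem.Int.floordiv n 2 + 1) ^ 2
  else
    (PySem.List.pyRange 2 (n + 1) 2).foldl (fun acc i => acc + i ^ 2) 0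

-- ===== PORT B =====
def solution_alt (n : Int) : Int :=
  if PySem.Int.mod n 2 = 1 then
    (PySem.Int.floordiv (n + 1) 2) ^ 2
  else
    let m := max (PySem.Int.floordiv n 2) 0
    PySem.Int.floordiv (2 * m * (m + 1) * (2 * m + 1)) 3

-- ===== PRECONDITION & SPEC =====
def Spec_solution (n : Int) (out : Int) : Prop := out = solution_alt n
instance (n : Int) (out : Int) : Decidable (Spec_solution n out) := by unfold Spec_solution; infer_instance

-- ===== CLAIM (what is proved, stated in full; the proofs are below) =====
def Claim_equal_solution : Prop := ∀ (n : Int), Dom_solution n → Spec_solution n (solution n)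

-- ===== LEMMAS AND PROOFS =====

-- 3 · Σ_{k<m} (2+2k)² = 2m(m+1)(2m+1)
theorem pv_sum_even_sq (m : Nat) :
    3 * ((List.range m).map (fun k : Nat => ((2:Int) + 2 * (k:Int)) ^ 2)).sum
      = 2 * (m : Int) * ((m : Int) + 1) * (2 * (m : Int) + 1) := by
  induction m with
  | zero => simp
  | succ m ih =>
    rw [List.range_succ, List.map_append, List.sum_append]
    simp only [List.map_cons, List.map_nil, List.sum_cons, List.sum_nil]
    push_cast; push_cast at ih; ring_nf; ring_nf at ih; omega

-- ===== VERDICT (by name: the statement is the Claim_ definition above) =====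
theorem solution_spec : Claim_equal_solution := by
  intro n _
  unfold Spec_solution solution solution_alt
  rcases PySem.Int.mod_two_eq n with h | h
  · -- even case: the loop sum equals the closed form
    rw [h]
    norm_num
    rw [PySem.List.pyRange_of_pos 2 (n + 1) (by norm_num),
        PySem.List.foldl_add, List.map_map]
    rw [PySem.Int.mod_eq_zero_iff_dvd] at h
    obtain ⟨q, hq⟩ := h
    subst hq
    have hq2 : 2 * q / 2 = q := by omega
    rw [hq2]
    by_cases hpos : 0 < q
    · have hlt : (2:Int) < 2 * q + 1 := by omega
      simp only [if_pos hlt]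
      have hcnt : ((2 * q + 1 - 2 + 2 - 1) / 2).toNat = q.toNat := by omega
      rw [hcnt]
      have hmax : max q 0 = q := by omega
      rw [hmax]
      have hfun : ((fun x : Int => x ^ 2) ∘ fun k : Nat => 2 + 2 * (k : Int))
          = fun k : Nat => ((2:Int) + 2 * (k:Int)) ^ 2 := by funext k; simp
      rw [hfun]
      have hs := pv_sum_even_sq q.toNat
      have hcast : ((q.toNat : Int)) = q := by omega
      rw [hcast] at hs
      have h3 : 2 * q * (q + 1) * (2 * q + 1)
          = 3 * ((List.range q.toNat).map (fun k : Nat => ((2:Int) + 2 * (k:Int)) ^ 2)).sum := hs.symm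
      rw [h3, Int.mul_ediv_cancel_left _ (by norm_num)]
      ring
    · have hlt : ¬ (2:Int) < 2 * q + 1 := by omega
      simp only [if_neg hlt]
      have hmax : max q 0 = 0 := by omega
      rw [hmax]
      simp
  · -- odd case: n//2 + 1 = (n+1)//2
    rw [h]
    have hmod : PySem.Int.mod n 2 = n % 2 := PySem.Int.mod_eq_emod_of_pos (by norm_num)
    rw [hmod] at h
    simp only [PySem.Int.floordiv_eq_ediv_of_pos (by norm_num : (0:Int) < 2)]
    have h2 : n / 2 + 1 = (n + 1) / 2 := by omega
    rw [h2]
    simp only [if_true]
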